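-- pv_equiv track=rewrite | github.com/junbeom-Son/baekjoon | 백준/Silver/2468. 안전 영역/안전 영역.py | initializeMap
-- ===== SOURCE A (Python) =====
-- def initializeMap(heights, N):
--     heightOrder = set()
--     heightPositions = dict()
--     for i in range(N):
--         for j in range(N):
--             height = heights[i][j]
--             heightOrder.add(height)
--             if height not in heightPositions:
--                 heightPositions[height] = []
--             heightPositions[height].append([i, j])
--     heightOrder = sorted(list(heightOrder))
--
--     return heightOrder, heightPositions
-- ===== SOURCE B (Python) =====
-- def initializeMap(heights, N):
--     flat = [(heights[i][j], i, j) for i in range(N) for j in range(N)]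
--     heightOrder = list(dict.fromkeys(h for h, _, _ in flat))
--     heightPositions = {h: [[i, j] for (g, i, j) in flat if g == h] for h in heightOrder}
--     return sorted(heightOrder), heightPositions
-- ===== Notes on version B (the rewrite author's own statement) =====
-- stated objective: alternative
-- what changed: Replaces the incremental set/dict bucketing loop by a flatten-then-group pass: flatten the grid to (height,i,j) tuples, dedup heights in first-occurrence order with dict.fromkeys, and build each height's position list by a per-height filter in a dict comprehension.
import Mathlib
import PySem

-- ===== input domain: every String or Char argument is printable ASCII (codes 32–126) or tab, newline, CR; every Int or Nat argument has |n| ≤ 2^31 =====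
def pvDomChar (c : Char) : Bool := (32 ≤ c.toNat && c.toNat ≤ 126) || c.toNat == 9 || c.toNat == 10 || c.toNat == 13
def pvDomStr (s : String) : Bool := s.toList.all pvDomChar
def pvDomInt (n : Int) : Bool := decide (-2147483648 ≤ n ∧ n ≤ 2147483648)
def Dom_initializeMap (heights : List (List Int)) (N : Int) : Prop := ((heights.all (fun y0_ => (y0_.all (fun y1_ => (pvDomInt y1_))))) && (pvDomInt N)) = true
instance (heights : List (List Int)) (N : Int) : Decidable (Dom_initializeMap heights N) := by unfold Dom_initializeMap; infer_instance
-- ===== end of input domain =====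

-- B replaces A's incremental set/dict bucketing loop by a flatten, dedup-in-order, per-height-filter grouping pass (alternative decomposition, same values).


-- heights[i][j]; the getD defaults are never reached on Pre_ (indices in range)
def pvCell (heights : List (List Int)) (i j : Int) : Int :=
  (PySem.List.pyGet? ((PySem.List.pyGet? heights i).getD []) j).getD 0

-- ===== PORT A =====
def initializeMap (heights : List (List Int)) (N : Int) : List Int × (List (Int × List (List Int))) :=
  let st :=
    (PySem.List.pyRange 0 N 1).foldl (fun st i =>
      (PySem.List.pyRange 0 N 1).foldl (fun st j =>
        let height := pvCell heights i j
        let order := PySem.Set.add st.1 height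
        let d := if st.2.contains height then st.2 else st.2.insert height []
        (order, d.insert height (d.getD height [] ++ [[i, j]]))) st) (PySem.Set.empty, PySem.Dict.empty)
  (PySem.List.sorted st.1 (fun x => x) false, st.2.items)

-- ===== PORT B =====
def initializeMap_alt (heights : List (List Int)) (N : Int) : List Int × (List (Int × List (List Int))) :=
  let flat := (PySem.List.pyRange 0 N 1).flatMap (fun i =>
    (PySem.List.pyRange 0 N 1).map (fun j => (pvCell heights i j, i, j)))
  let heightOrder := PySem.List.dedup (flat.map (fun t => t.1))
  let heightPositions := heightOrder.map (fun h =>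
    (h, (flat.filter (fun t => t.1 == h)).map (fun t => [t.2.1, t.2.2])))
  (PySem.List.sorted heightOrder (fun x => x) false, heightPositions)

-- ===== PRECONDITION & SPEC =====
-- Pre_ excludes exactly the inputs on which Python A raises IndexError: fewer than N rows, or a row among the first N shorter than N.
def Pre_initializeMap (heights : List (List Int)) (N : Int) : Prop :=
  N ≤ (heights.length : Int) ∧ ∀ row ∈ heights.take N.toNat, N ≤ (row.length : Int)
instance (heights : List (List Int)) (N : Int) : Decidable (Pre_initializeMap heights N) := by unfold Pre_initializeMap; infer_instance
def pvWitness_initializeMap : List (List Int) × Int := ([[1, 2], [2, 1]], 2)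

def Spec_initializeMap (heights : List (List Int)) (N : Int) (out : List Int × (List (Int × List (List Int)))) : Prop := out = initializeMap_alt heights N
instance (heights : List (List Int)) (N : Int) (out : List Int × (List (Int × List (List Int)))) : Decidable (Spec_initializeMap heights N out) := by unfold Spec_initializeMap; infer_instance

-- ===== CLAIM (what is proved, stated in full; the proofs are below) =====
def Claim_equal_initializeMap : Prop := ∀ (heights : List (List Int)) (N : Int), Dom_initializeMap heights N → Pre_initializeMap heights N → Spec_initializeMap heights N (initializeMap heights N)

-- ===== LEMMAS AND PROOFS =====

-- A's branch-then-append step equals a single modify-append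
theorem pv_step_eq (d : PySem.Dict Int (List (List Int))) (h : Int) (v : List Int) :
    (let d1 := if d.contains h then d else d.insert h []
     d1.insert h (d1.getD h [] ++ [v])) = d.modify h [] (· ++ [v]) := by
  show (if d.contains h then d else d.insert h []).insert h
      ((if d.contains h then d else d.insert h []).getD h [] ++ [v]) = d.insert h (d.getD h [] ++ [v])
  by_cases hc : d.contains h = true
  · simp [hc]
  · simp only [Bool.not_eq_true] at hc
    rw [if_neg (by simp [hc]), PySem.Dict.getD_insert_self, PySem.Dict.insert_insert_self,
      PySem.Dict.getD_of_not_contains d [] hc]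

theorem pv_ports_eq (heights : List (List Int)) (N : Int) :
    (let st :=
      (PySem.List.pyRange 0 N 1).foldl (fun st i =>
        (PySem.List.pyRange 0 N 1).foldl (fun st j =>
          let height := pvCell heights i j
          let order := PySem.Set.add st.1 height
          let d := if st.2.contains height then st.2 else st.2.insert height []
          (order, d.insert height (d.getD height [] ++ [[i, j]]))) st) (PySem.Set.empty, PySem.Dict.empty)
     (PySem.List.sorted st.1 (fun x => x) false, st.2.items)) =
    (let flat := (PySem.List.pyRange 0 N 1).flatMap (fun i =>
        (PySem.List.pyRange 0 N 1).map (fun j => (pvCell heights i j, i, j)))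
     let heightOrder := PySem.List.dedup (flat.map (fun t => t.1))
     let heightPositions := heightOrder.map (fun h =>
        (h, (flat.filter (fun t => t.1 == h)).map (fun t => [t.2.1, t.2.2])))
     (PySem.List.sorted heightOrder (fun x => x) false, heightPositions)) := by
  set R := PySem.List.pyRange 0 N 1 with hR
  set flat := R.flatMap (fun i => R.map (fun j => (pvCell heights i j, i, j))) with hflat
  -- rewrite A's double fold as a single fold over flat
  have h1 : (R.foldl (fun st i =>
        R.foldl (fun st j =>
          let height := pvCell heights i j
          let order := PySem.Set.add st.1 height
          let d := if st.2.contains height then st.2 else st.2.insert height []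
          (order, d.insert height (d.getD height [] ++ [[i, j]]))) st)
        ((PySem.Set.empty : PySem.Set Int), (PySem.Dict.empty : PySem.Dict Int (List (List Int))))) =
      flat.foldl (fun st t => (PySem.Set.add st.1 t.1, st.2.modify t.1 [] (· ++ [[t.2.1, t.2.2]])))
        (PySem.Set.empty, PySem.Dict.empty) := by
    rw [hflat, List.foldl_flatMap]
    apply PySem.List.foldl_congr_mem
    intro st i _
    rw [List.foldl_map]
    apply PySem.List.foldl_congr_mem
    intro st j _
    exact congrArg (Prod.mk _) (pv_step_eq st.2 (pvCell heights i j) [i, j])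
  rw [h1, PySem.List.foldl_prod_mk (f := fun s (t : Int × Int × Int) => PySem.Set.add s t.1)
    (g := fun d (t : Int × Int × Int) => PySem.Dict.modify d t.1 [] (· ++ [[t.2.1, t.2.2]]))]
  -- set component
  have h2 : flat.foldl (fun s t => PySem.Set.add s t.1) PySem.Set.empty
      = PySem.Set.ofList (flat.map (fun t => t.1)) := by
    rw [PySem.Set.ofList_eq_foldl, List.foldl_map]; rfl
  -- dict component via pairs
  set pairs := flat.map (fun t => (t.1, [t.2.1, t.2.2])) with hpairs
  have h3 : flat.foldl (fun d t => PySem.Dict.modify d t.1 [] (· ++ [[t.2.1, t.2.2]]))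
        (PySem.Dict.empty : PySem.Dict Int (List (List Int)))
      = pairs.foldl (fun d p => d.modify p.1 [] (· ++ [p.2])) PySem.Dict.empty := by
    rw [hpairs, List.foldl_map]
  set D := pairs.foldl (fun d p => d.modify p.1 [] (· ++ [p.2]))
      (PySem.Dict.empty : PySem.Dict Int (List (List Int))) with hD
  have hkeys : D.keys = PySem.Set.ofList (flat.map (fun t => t.1)) := by
    rw [hD]
    rw [PySem.Dict.keys_foldl_modify_key pairs (fun p => p.1) [] (fun _ p l => l ++ [p.2])]
    rw [PySem.Dict.keys_empty, hpairs, List.map_map]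
    rw [PySem.Set.ofList_eq_foldl]; rfl
  have hnd : D.keys.Nodup := by
    rw [hD]
    exact PySem.Dict.nodup_keys_foldl_modify_key pairs (fun p => p.1) [] (fun _ p l => l ++ [p.2])
      _ (by rw [PySem.Dict.keys_empty]; exact List.nodup_nil)
  have hitems : D.items = (PySem.Set.ofList (flat.map (fun t => t.1))).map
      (fun k => (k, (flat.filter (fun t => t.1 == k)).map (fun t => [t.2.1, t.2.2]))) := by
    rw [PySem.Dict.items_eq_map_keys D hnd [], hkeys]
    apply List.map_congr_left
    intro k _
    have := PySem.Dict.getD_foldl_modify_append pairs PySem.Dict.empty k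
    rw [← hD] at this
    rw [this, PySem.Dict.getD_empty, List.nil_append, hpairs, List.filter_map, List.map_map]
    rfl
  simp only [h2, h3, hitems, PySem.List.dedup_eq_ofList]

theorem pv_main (heights : List (List Int)) (N : Int) :
    initializeMap heights N = initializeMap_alt heights N := by
  show _ = _
  unfold initializeMap initializeMap_alt
  exact pv_ports_eq heights N

-- ===== VERDICT (by name: the statement is the Claim_ definition above) =====
theorem initializeMap_spec : Claim_equal_initializeMap := by
  intro heights N _ _
  exact pv_main heights N
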